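-- pv_equiv track=rewrite | github.com/Geralt1983/Thanos | Tools/memory_capture_router.py | _should_capture
-- ===== SOURCE A (Python) =====
-- def _should_capture(content: str) -> bool:
--     if not content or len(content) < 40:
--         return False
--     lower = content.lower()
--     keywords = [
--         "decided", "decision", "chose", "will use", "fixed", "resolved",
--         "pattern", "lesson", "insight", "root cause", "bug", "issue", "plan",
--         "commit", "remember to", "need to", "must", "should"
--     ]
--     return any(k in lower for k in keywords)
-- ===== SOURCE B (Python) =====
-- def _should_capture(content: str) -> bool:
--     if not content or len(content) < 40:
--         return False
--     lower = content.lower()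
--     keywords = [
--         "decided", "decision", "chose", "will use", "fixed", "resolved",
--         "pattern", "lesson", "insight", "root cause", "bug", "issue", "plan",
--         "commit", "remember to", "need to", "must", "should"
--     ]
--     for i in range(len(lower)):
--         if any(lower.startswith(k, i) for k in keywords):
--             return True
--     return False
-- ===== Notes on version B (the rewrite author's own statement) =====
-- stated objective: alternative
-- what changed: Replaces A's 18 separate keyword-major substring scans ('k in lower' per keyword) with one position-major left-to-right pass over the lowered text that checks at each offset whether any keyword starts there and returns at the first hit.
import Mathlib
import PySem

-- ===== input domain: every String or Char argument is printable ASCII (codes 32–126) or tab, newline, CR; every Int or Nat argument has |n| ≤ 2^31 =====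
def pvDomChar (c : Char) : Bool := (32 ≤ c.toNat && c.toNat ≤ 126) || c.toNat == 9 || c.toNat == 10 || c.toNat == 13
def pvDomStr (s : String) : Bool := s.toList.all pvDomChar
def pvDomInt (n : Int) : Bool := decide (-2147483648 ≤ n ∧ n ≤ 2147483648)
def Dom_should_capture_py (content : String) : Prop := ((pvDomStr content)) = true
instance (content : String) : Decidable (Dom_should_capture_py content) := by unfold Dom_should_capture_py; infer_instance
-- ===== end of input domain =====

-- B replaces A's per-keyword substring scans with a single position-major pass
-- (at each offset, does some keyword start here?); return value equivalence only.

-- ===== PORT A =====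
def pvKeywords : List String :=
  ["decided", "decision", "chose", "will use", "fixed", "resolved",
   "pattern", "lesson", "insight", "root cause", "bug", "issue", "plan",
   "commit", "remember to", "need to", "must", "should"]

def should_capture_py (content : String) : Bool :=
  if content.toList.isEmpty || PySem.Str.len content < 40 then false
  else
    let lower := PySem.Str.lower content
    pvKeywords.any (fun k => PySem.Str.isIn k lower)

-- ===== PORT B =====
-- the loop 'for i in range(len(lower)): if any(lower.startswith(k, i) …)'
-- as structural recursion over the suffixes of the lowered character list
def pvScan (kws : List (List Char)) : List Char → Bool
  | [] => false
  | c :: rest =>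
      if kws.any (fun k => k.isPrefixOf (c :: rest)) then true else pvScan kws rest

def should_capture_py_alt (content : String) : Bool :=
  if content.toList.isEmpty || PySem.Str.len content < 40 then false
  else pvScan (pvKeywords.map String.toList) (PySem.Str.lower content).toList

-- ===== PRECONDITION & SPEC =====
def Spec_should_capture_py (content : String) (out : Bool) : Prop := out = should_capture_py_alt content
instance (content : String) (out : Bool) : Decidable (Spec_should_capture_py content out) := by unfold Spec_should_capture_py; infer_instance

-- ===== CLAIM (what is proved, stated in full; the proofs are below) =====
def Claim_equal_should_capture_py : Prop := ∀ (content : String), Dom_should_capture_py content → Spec_should_capture_py content (should_capture_py content)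

-- ===== LEMMAS AND PROOFS =====
lemma pvScan_iff (kws : List (List Char)) (hk : ∀ k ∈ kws, k ≠ []) :
    ∀ l : List Char, (pvScan kws l = true ↔ ∃ k ∈ kws, k <:+: l)
  | [] => by
    simp only [pvScan]
    constructor
    · intro h; exact absurd h (by simp)
    · rintro ⟨k, hkm, hinf⟩
      exact absurd (List.eq_nil_of_infix_nil hinf) (hk k hkm)
  | c :: rest => by
    show (if kws.any (fun k => k.isPrefixOf (c :: rest)) then true else pvScan kws rest) = true
        ↔ ∃ k ∈ kws, k <:+: c :: rest
    by_cases h : kws.any (fun k => k.isPrefixOf (c :: rest)) = true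
    · rw [if_pos h]
      refine ⟨fun _ => ?_, fun _ => rfl⟩
      rcases List.any_eq_true.mp h with ⟨k, hkm, hp⟩
      exact ⟨k, hkm, (List.infix_cons_iff).mpr (Or.inl (List.isPrefixOf_iff_prefix.mp hp))⟩
    · rw [if_neg h, pvScan_iff kws hk rest]
      constructor
      · rintro ⟨k, hkm, hinf⟩; exact ⟨k, hkm, (List.infix_cons_iff).mpr (Or.inr hinf)⟩
      · rintro ⟨k, hkm, hinf⟩
        rcases List.infix_cons_iff.mp hinf with hpre | hinf'
        · exact absurd (List.any_eq_true (p := fun k => k.isPrefixOf (c :: rest)) |>.mpr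
            ⟨k, hkm, List.isPrefixOf_iff_prefix.mpr hpre⟩) h
        · exact ⟨k, hkm, hinf'⟩

-- ===== VERDICT (by name: the statement is the Claim_ definition above) =====
theorem should_capture_py_spec : Claim_equal_should_capture_py := by
  intro content _
  unfold Spec_should_capture_py should_capture_py should_capture_py_alt
  split_ifs with hg
  · rfl
  · rw [Bool.eq_iff_iff, List.any_eq_true,
        pvScan_iff _ (by decide) (PySem.Str.lower content).toList]
    constructor
    · rintro ⟨k, hkm, hin⟩
      exact ⟨k.toList, List.mem_map_of_mem hkm, (PySem.Str.isIn_iff_infix k _).mp hin⟩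
    · rintro ⟨kl, hkm, hinf⟩
      rcases List.mem_map.mp hkm with ⟨k, hk, rfl⟩
      exact ⟨k, hk, (PySem.Str.isIn_iff_infix k _).mpr hinf⟩
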